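-- pv_equiv track=rewrite | github.com/Maxibond/YandexBot | keyboard.py | create_keyboard_with_tags
-- ===== SOURCE A (Python) =====
-- def sort_by_size(keys: list):
--     is_done = False
--     while not is_done:
--         is_done = True
--         for i in range(len(keys)-1):
--             if len(keys[i]) > len(keys[i+1]):
--                 is_done = False
--                 keys[i], keys[i+1] = keys[i+1], keys[i]
--
-- def free_len(k):
--     res = 0
--     for i in k:
--         if res < len(i) + 2:
--             res = len(i) + 2
--     return 50 - res*len(k)
--
-- def add_button(kb, key):
--     if not kb:
--         kb.append([key])
--     else:
--         for k in kb:
--             if len(key) < free_len(k):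
--                 k.append(key)
--                 return
--         kb.append([key])
--
-- def create_keyboard_with_tags(keys: list):
--     sort_by_size(keys)
--     if '➕Доход' in keys:
--         keys.remove('➕Доход')
--     if '$yhg' in keys:
--         keys.remove('$yhg')
--     kb = [['➕Доход'], ]
--     for key in keys:
--         add_button(kb, key)
--     return kb
-- ===== SOURCE B (Python) =====
-- # B: sort via the built-in stable sort (key=len) instead of hand-written bubble sort, and pack
-- # greedily while caching per-row metadata (max element width, element count) so each row's free
-- # capacity is O(1) instead of rescanning the row; mutates `keys` (sort + removes) exactly like A.
-- def create_keyboard_with_tags(keys: list):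
--     keys.sort(key=len)
--     if '➕Доход' in keys:
--         keys.remove('➕Доход')
--     if '$yhg' in keys:
--         keys.remove('$yhg')
--     # each entry: (row, w, c) with w = max(len(e) + 2 for e in row), c = len(row)
--     rows = [(['➕Доход'], len('➕Доход') + 2, 1)]
--     for key in keys:
--         for i, (row, w, c) in enumerate(rows):
--             if len(key) < 50 - w * c:
--                 rows[i] = (row + [key], max(w, len(key) + 2), c + 1)
--                 break
--         else:
--             rows.append(([key], len(key) + 2, 1))
--     return [row for row, _, _ in rows]
-- ===== Notes on version B (the rewrite author's own statement) =====
-- stated objective: faster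
-- what changed: B replaces A's hand-written bubble sort with the built-in stable sort (key=len) and packs keys into rows while maintaining per-row cached metadata (max element width, element count), so a row's free capacity is computed in O(1) instead of A's full rescan of the row for every candidate key.
import Mathlib
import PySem

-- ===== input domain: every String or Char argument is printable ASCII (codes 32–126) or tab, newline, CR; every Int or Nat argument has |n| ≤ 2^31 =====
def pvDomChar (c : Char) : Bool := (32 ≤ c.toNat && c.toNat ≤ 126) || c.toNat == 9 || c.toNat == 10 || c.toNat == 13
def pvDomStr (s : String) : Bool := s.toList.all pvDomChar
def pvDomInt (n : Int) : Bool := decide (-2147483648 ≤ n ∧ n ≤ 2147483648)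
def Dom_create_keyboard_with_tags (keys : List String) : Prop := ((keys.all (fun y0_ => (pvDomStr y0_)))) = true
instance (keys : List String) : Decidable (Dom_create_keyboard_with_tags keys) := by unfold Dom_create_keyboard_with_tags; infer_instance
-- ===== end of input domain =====

-- B replaces A's hand-written bubble sort by the built-in stable sort (key = len) and packs rows
-- while caching per-row metadata (max element width, element count) instead of rescanning each row;
-- equivalence is about the RETURN value (Python A mutates `keys` in place; Python B performs the
-- same mutations: stable sort by length, then the same two removes).

-- ===== PORT A =====
-- sort_by_size: one `for i in range(len(keys)-1)` pass; returns (list after the pass, is_done flag)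
def bubblePass : List String → List String × Bool
  | x :: y :: rest =>
    if PySem.Str.len x > PySem.Str.len y then
      (y :: (bubblePass (x :: rest)).1, false)
    else
      let r := bubblePass (y :: rest)
      (x :: r.1, r.2)
  | l => (l, true)
  termination_by l => l.length

-- fuel bound for the `while not is_done` loop: the number of inversions
-- (each not-done pass strictly decreases it — pv_pass_inv_lt — so the fuel is never exhausted)
def invCount : List String → Nat
  | [] => 0
  | x :: xs => xs.countP (fun y => decide (PySem.Str.len y < PySem.Str.len x)) + invCount xs

-- sort_by_size's `while not is_done` loop, made total by the fuel above
def bubbleLoop : Nat → List String → List String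
  | 0, l => l
  | fuel + 1, l =>
    let p := bubblePass l
    if p.2 then p.1 else bubbleLoop fuel p.1

-- the `res` accumulation loop inside free_len
def fl_res (k : List String) : Int :=
  k.foldl (fun res i => if res < PySem.Str.len i + 2 then PySem.Str.len i + 2 else res) 0

def free_len (k : List String) : Int := 50 - fl_res k * k.length

-- add_button's `for k in kb` scan with its fall-through append
def placeA : List (List String) → String → List (List String)
  | [], key => [[key]]
  | k :: rest, key =>
    if PySem.Str.len key < free_len k then (k ++ [key]) :: rest else k :: placeA rest key

def add_button (kb : List (List String)) (key : String) : List (List String) :=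
  if kb = [] then kb ++ [[key]] else placeA kb key

def create_keyboard_with_tags (keys : List String) : List (List String) :=
  let s := bubbleLoop (invCount keys + 1) keys
  let s := if "➕Доход" ∈ s then (PySem.List.remove? s "➕Доход").getD s else s
  let s := if "$yhg" ∈ s then (PySem.List.remove? s "$yhg").getD s else s
  s.foldl add_button [["➕Доход"]]

-- ===== PORT B =====
-- the inner `for i, (row, w, c) in enumerate(rows)` scan with its for-else append
def placeB : List (List String × Int × Int) → String → List (List String × Int × Int)
  | [], key => [([key], PySem.Str.len key + 2, 1)]
  | (row, w, c) :: rest, key =>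
    if PySem.Str.len key < 50 - w * c then
      (row ++ [key], max w (PySem.Str.len key + 2), c + 1) :: rest
    else
      (row, w, c) :: placeB rest key

def create_keyboard_with_tags_alt (keys : List String) : List (List String) :=
  let s := PySem.List.sorted keys PySem.Str.len
  let s := if "➕Доход" ∈ s then (PySem.List.remove? s "➕Доход").getD s else s
  let s := if "$yhg" ∈ s then (PySem.List.remove? s "$yhg").getD s else s
  (s.foldl placeB [(["➕Доход"], PySem.Str.len "➕Доход" + 2, 1)]).map (fun t => t.1)

-- ===== PRECONDITION & SPEC =====
def Spec_create_keyboard_with_tags (keys : List String) (out : List (List String)) : Prop := out = create_keyboard_with_tags_alt keys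
instance (keys : List String) (out : List (List String)) : Decidable (Spec_create_keyboard_with_tags keys out) := by unfold Spec_create_keyboard_with_tags; infer_instance

-- ===== CLAIM (what is proved, stated in full; the proofs are below) =====
def Claim_equal_create_keyboard_with_tags : Prop := ∀ (keys : List String), Dom_create_keyboard_with_tags keys → Spec_create_keyboard_with_tags keys (create_keyboard_with_tags keys)

-- ===== LEMMAS AND PROOFS =====

-- insertions of a strictly longer and a strictly shorter element commute (any accumulator)
theorem pv_ins_comm {α : Type} (key : α → Int) (x y : α) (h : key y < key x) (acc : List α) :
    PySem.List.insertBy (fun a b => decide (key a < key b)) x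
      (PySem.List.insertBy (fun a b => decide (key a < key b)) y acc) =
    PySem.List.insertBy (fun a b => decide (key a < key b)) y
      (PySem.List.insertBy (fun a b => decide (key a < key b)) x acc) := by
  induction acc with
  | nil =>
    simp only [PySem.List.insertBy]
    rw [if_neg (by simp [not_lt, le_of_lt h]), if_pos (by simp [h])]
  | cons a acc ih =>
    by_cases hx : key x < key a
    · have hy : key y < key a := lt_trans h hx
      simp [PySem.List.insertBy, hx, hy, lt_asymm h, h]
    · by_cases hy : key y < key a
      · simp [PySem.List.insertBy, hx, hy, lt_asymm h]
      · simp [PySem.List.insertBy, hx, hy, ih]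

-- a bubble pass does not change the stable insertion-sort fold
theorem pv_pass_foldl (l : List String) : ∀ acc : List String,
    (bubblePass l).1.foldl (fun acc x => PySem.List.insertBy (fun a b => decide (PySem.Str.len a < PySem.Str.len b)) x acc) acc =
    l.foldl (fun acc x => PySem.List.insertBy (fun a b => decide (PySem.Str.len a < PySem.Str.len b)) x acc) acc := by
  fun_induction bubblePass l with
  | case1 x y rest hgt ih =>
    intro acc
    simp only [List.foldl_cons]
    rw [ih, List.foldl_cons, pv_ins_comm PySem.Str.len x y hgt]
  | case2 x y rest hgt r ih =>
    intro acc
    simp only [List.foldl_cons]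
    rw [ih, List.foldl_cons]
  | case3 l hne => intro acc; rfl

theorem pv_pass_perm (l : List String) : ((bubblePass l).1).Perm l := by
  fun_induction bubblePass l with
  | case1 x y rest hgt ih =>
    exact ((ih.cons y).trans (List.Perm.swap x y rest))
  | case2 x y rest hgt r ih => exact ih.cons x
  | case3 l hne => exact List.Perm.refl l

theorem pv_pass_done_eq (l : List String) (h : (bubblePass l).2 = true) : (bubblePass l).1 = l := by
  fun_induction bubblePass l with
  | case1 x y rest hgt ih => simp at h
  | case2 x y rest hgt r ih =>
    have hr : r = bubblePass (y :: rest) := rfl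
    simpa [hr] using ih h
  | case3 l hne => rfl

theorem pv_pass_done_pairwise (l : List String) (h : (bubblePass l).2 = true) :
    l.Pairwise (fun a b => PySem.Str.len a ≤ PySem.Str.len b) := by
  fun_induction bubblePass l with
  | case1 x y rest hgt ih => simp at h
  | case2 x y rest hgt r ih =>
    have hp := ih (by simpa using h)
    refine List.Pairwise.cons ?_ hp
    intro a ha
    rcases List.mem_cons.mp ha with rfl | ha
    · exact le_of_not_gt hgt
    · exact le_trans (le_of_not_gt hgt) (List.rel_of_pairwise_cons hp ha)
  | case3 l hne =>
    match l, hne with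
    | [], _ => exact List.Pairwise.nil
    | [x], _ => simp
    | x :: y :: r, hne => exact absurd rfl (hne x y r)

theorem pv_pass_inv_le (l : List String) : invCount (bubblePass l).1 ≤ invCount l := by
  fun_induction bubblePass l with
  | case1 x y rest hgt ih =>
    have hgt' : PySem.Str.len y < PySem.Str.len x := hgt
    have hperm := pv_pass_perm (x :: rest)
    have hc := fun z : String => hperm.countP_eq (fun w => decide (PySem.Str.len w < PySem.Str.len z))
    simp only [invCount] at ih ⊢
    rw [hc y]
    simp only [List.countP_cons, hgt', decide_true, lt_asymm hgt', decide_false]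
    simp at ih ⊢
    omega
  | case2 x y rest hgt r ih =>
    have hr : r = bubblePass (y :: rest) := rfl
    have hperm := pv_pass_perm (y :: rest)
    have hc : ((bubblePass (y :: rest)).1).countP (fun w => decide (PySem.Str.len w < PySem.Str.len x)) = (y :: rest).countP (fun w => decide (PySem.Str.len w < PySem.Str.len x)) :=
      hperm.countP_eq _
    simp only [hr]
    simp only [invCount] at ih ⊢
    rw [hc]
    omega
  | case3 l hne => exact le_refl _

theorem pv_pass_inv_lt (l : List String) (h : (bubblePass l).2 = false) :
    invCount (bubblePass l).1 < invCount l := by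
  fun_induction bubblePass l with
  | case1 x y rest hgt ih =>
    have hgt' : PySem.Str.len y < PySem.Str.len x := hgt
    have hle := pv_pass_inv_le (x :: rest)
    have hperm := pv_pass_perm (x :: rest)
    have hc := fun z : String => hperm.countP_eq (fun w => decide (PySem.Str.len w < PySem.Str.len z))
    simp only [invCount] at hle ⊢
    rw [hc y]
    simp only [List.countP_cons, hgt', decide_true, lt_asymm hgt', decide_false]
    simp at hle ⊢
    omega
  | case2 x y rest hgt r ih =>
    have hr : r = bubblePass (y :: rest) := rfl
    have hlt := ih h
    have hperm := pv_pass_perm (y :: rest)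
    have hc : ((bubblePass (y :: rest)).1).countP (fun w => decide (PySem.Str.len w < PySem.Str.len x)) = (y :: rest).countP (fun w => decide (PySem.Str.len w < PySem.Str.len x)) :=
      hperm.countP_eq _
    simp only [hr]
    simp only [invCount] at hlt ⊢
    rw [hc]
    omega
  | case3 l hne =>
    simp at h

theorem pv_loop_sorted : ∀ (fuel : Nat) (l : List String), invCount l < fuel →
    bubbleLoop fuel l = PySem.List.sorted l PySem.Str.len := by
  intro fuel
  induction fuel with
  | zero => intro l h; omega
  | succ n ih =>
    intro l h
    by_cases hd : (bubblePass l).2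
    · simp only [bubbleLoop, hd, if_true]
      rw [pv_pass_done_eq l hd, PySem.List.sorted_eq_self_of_pairwise l PySem.Str.len (pv_pass_done_pairwise l hd)]
    · have hd' : (bubblePass l).2 = false := by simpa using hd
      simp only [bubbleLoop, hd', Bool.false_eq_true, if_false]
      have hlt := pv_pass_inv_lt l hd'
      rw [ih (bubblePass l).1 (by omega)]
      rw [PySem.List.sorted_eq_foldl_insertBy, PySem.List.sorted_eq_foldl_insertBy]
      exact pv_pass_foldl l []

-- packing invariant: cached width = fl_res row, cached count = row length
def RowsInv (rows : List (List String × Int × Int)) : Prop :=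
  ∀ p ∈ rows, p.2.1 = fl_res p.1 ∧ p.2.2 = (p.1.length : Int)

theorem pv_len_nonneg (s : String) : 0 ≤ PySem.Str.len s := by
  rw [PySem.Str.len_eq]; positivity

theorem pv_fl_res_append (r : List String) (key : String) :
    fl_res (r ++ [key]) = max (fl_res r) (PySem.Str.len key + 2) := by
  simp only [fl_res, List.foldl_append, List.foldl_cons, List.foldl_nil]
  split_ifs with h <;> omega

theorem pv_place_step (key : String) : ∀ rows, RowsInv rows →
    placeA (rows.map (fun t => t.1)) key = (placeB rows key).map (fun t => t.1) ∧
    RowsInv (placeB rows key) := by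
  intro rows
  induction rows with
  | nil =>
    intro _
    refine ⟨rfl, ?_⟩
    intro p hp
    simp only [placeB, List.mem_singleton] at hp
    subst hp
    constructor
    · simp only [fl_res, List.foldl_cons, List.foldl_nil]
      have := pv_len_nonneg key
      rw [if_pos (by omega)]
    · simp
  | cons q rest ih =>
    intro hinv
    obtain ⟨row, w, c⟩ := q
    have hq := hinv ⟨row, w, c⟩ (List.mem_cons_self)
    obtain ⟨hw, hc⟩ := hq
    simp only at hw hc
    have hrest : RowsInv rest := fun p hp => hinv p (List.mem_cons_of_mem _ hp)
    by_cases hfit : PySem.Str.len key < 50 - w * c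
    · have hfree : PySem.Str.len key < free_len row := by
        simp only [free_len]; rw [← hw, ← hc] at *; omega
      refine ⟨?_, ?_⟩
      · simp only [List.map_cons, placeA, placeB]
        rw [if_pos hfree, if_pos hfit]
        simp
      · intro p hp
        simp only [placeB] at hp
        rw [if_pos hfit] at hp
        simp only [List.mem_cons] at hp
        rcases hp with rfl | hp
        · constructor
          · simp only [pv_fl_res_append, hw]
          · simp [hc]
        · exact hrest p hp
    · have hfree : ¬ PySem.Str.len key < free_len row := by
        simp only [free_len]; rw [← hw, ← hc] at *; omega
      obtain ⟨ih1, ih2⟩ := ih hrest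
      refine ⟨?_, ?_⟩
      · simp only [List.map_cons, placeA, placeB]
        rw [if_neg hfree, if_neg hfit]
        simp [ih1]
      · intro p hp
        simp only [placeB] at hp
        rw [if_neg hfit] at hp
        simp only [List.mem_cons] at hp
        rcases hp with rfl | hp
        · exact ⟨hw, hc⟩
        · exact ih2 p hp

theorem pv_add_button_eq (kb : List (List String)) (key : String) :
    add_button kb key = placeA kb key := by
  cases kb <;> simp [add_button, placeA]

theorem pv_fold_pack : ∀ (keys : List String) (rows : List (List String × Int × Int)), RowsInv rows →
    keys.foldl add_button (rows.map (fun t => t.1)) = (keys.foldl placeB rows).map (fun t => t.1) := by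
  intro keys
  induction keys with
  | nil => intro rows _; rfl
  | cons k keys ih =>
    intro rows hinv
    obtain ⟨h1, h2⟩ := pv_place_step k rows hinv
    simp only [List.foldl_cons, pv_add_button_eq, h1]
    exact ih _ h2

theorem pv_rows0_inv : RowsInv [(["➕Доход"], PySem.Str.len "➕Доход" + 2, 1)] := by
  intro p hp
  simp only [List.mem_singleton] at hp
  subst hp
  exact ⟨by decide, by decide⟩

-- ===== VERDICT (by name: the statement is the Claim_ definition above) =====
theorem create_keyboard_with_tags_spec : Claim_equal_create_keyboard_with_tags := by
  intro keys _
  unfold Spec_create_keyboard_with_tags create_keyboard_with_tags create_keyboard_with_tags_alt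
  simp only
  rw [pv_loop_sorted (invCount keys + 1) keys (Nat.lt_succ_self _)]
  exact pv_fold_pack _ _ pv_rows0_inv
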